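-- pv_equiv track=rewrite | github.com/samaypashine/Cross-Robot-Knowledge-Transfer-Lite | paper5/utils.py | fix_names
-- ===== SOURCE A (Python) =====
-- def fix_names(names):
--
--     names = list(names)
--     for i, name in enumerate(names):
--         if name in ['1-look', '2-stirring-slow', '3-stirring-fast', '4-stirring-twist', '5-whisk', '6-poke']:
--             names[i] = '-'.join([x.capitalize() for x in name[2:].split('-')])
--         elif name in ['plastic-knife', 'metal-whisk', 'wooden-chopstick', 'plastic-spoon', 'metal-scissor',
--                       'wooden-fork']:
--             names[i] = '-'.join([x.capitalize() for x in name.split('-')])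
--         elif name in ['camera_depth_image', 'camera_rgb_image', 'touch_image', 'audio', 'gripper_joint_states',
--                       'effort', 'position', 'velocity', 'torque', 'force']:
--             if 'depth' in name:
--                 names[i] = 'Depth-Image'
--             elif 'rgb' in name:
--                 names[i] = 'RGB-Image'
--             elif 'gripper' in name:
--                 names[i] = 'Gripper'
--             else:
--                 names[i] = name.capitalize()
--
--     return names
-- ===== SOURCE B (Python) =====
-- # Precomputed lookup table: every known name mapped to its final label; unknown names pass through.
-- _TABLE = {
--     '1-look': 'Look',
--     '2-stirring-slow': 'Stirring-Slow',
--     '3-stirring-fast': 'Stirring-Fast',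
--     '4-stirring-twist': 'Stirring-Twist',
--     '5-whisk': 'Whisk',
--     '6-poke': 'Poke',
--     'plastic-knife': 'Plastic-Knife',
--     'metal-whisk': 'Metal-Whisk',
--     'wooden-chopstick': 'Wooden-Chopstick',
--     'plastic-spoon': 'Plastic-Spoon',
--     'metal-scissor': 'Metal-Scissor',
--     'wooden-fork': 'Wooden-Fork',
--     'camera_depth_image': 'Depth-Image',
--     'camera_rgb_image': 'RGB-Image',
--     'touch_image': 'Touch_image',
--     'audio': 'Audio',
--     'gripper_joint_states': 'Gripper',
--     'effort': 'Effort',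
--     'position': 'Position',
--     'velocity': 'Velocity',
--     'torque': 'Torque',
--     'force': 'Force',
-- }
--
-- def fix_names(names):
--     names = list(names)
--     return [_TABLE.get(name, name) for name in names]
-- ===== Notes on version B (the rewrite author's own statement) =====
-- stated objective: idiomatic
-- what changed: The per-element if/elif cascade with splitting, capitalizing and substring tests is precomputed once into a constant 22-entry lookup table, so the body is a single flat table-lookup pass (TABLE.get(name, name)).
import Mathlib
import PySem

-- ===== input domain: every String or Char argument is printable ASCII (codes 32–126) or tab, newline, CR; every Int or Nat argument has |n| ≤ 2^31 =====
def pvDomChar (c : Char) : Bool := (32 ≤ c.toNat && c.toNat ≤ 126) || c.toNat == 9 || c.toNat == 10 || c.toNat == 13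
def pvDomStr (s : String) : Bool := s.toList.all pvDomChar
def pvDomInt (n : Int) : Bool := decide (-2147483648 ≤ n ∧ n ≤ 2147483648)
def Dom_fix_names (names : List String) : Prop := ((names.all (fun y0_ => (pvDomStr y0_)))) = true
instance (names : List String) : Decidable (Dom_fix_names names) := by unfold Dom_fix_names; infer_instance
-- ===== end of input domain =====

-- B replaces A's per-element if/elif cascade (splits, capitalizations, substring tests) by a single
-- precomputed 22-entry lookup table and one flat map pass (objective: idiomatic).

-- ===== PORT A =====
-- str.capitalize(): first character upper-cased, the rest lower-cased (exact on ASCII via PySem.Chars case maps)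
def pyCapitalizeChars (cs : List Char) : List Char :=
  match cs with
  | [] => []
  | c :: rest => PySem.Chars.upperChar c :: PySem.Chars.lower rest

def pyCapitalize (s : String) : String := String.ofList (pyCapitalizeChars s.toList)

def fix_names (names : List String) : List String :=
  (PySem.List.enumerate names).foldl
    (fun acc p =>
      if p.2 ∈ ["1-look", "2-stirring-slow", "3-stirring-fast", "4-stirring-twist", "5-whisk", "6-poke"] then
        PySem.List.pySetD acc p.1
          (String.ofList (PySem.Chars.join "-".toList
            (((PySem.Chars.splitOn (PySem.List.slice p.2.toList (some 2) none) "-".toList)).map pyCapitalizeChars)))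
      else if p.2 ∈ ["plastic-knife", "metal-whisk", "wooden-chopstick", "plastic-spoon", "metal-scissor", "wooden-fork"] then
        PySem.List.pySetD acc p.1
          (String.ofList (PySem.Chars.join "-".toList
            (((PySem.Chars.splitOn p.2.toList "-".toList)).map pyCapitalizeChars)))
      else if p.2 ∈ ["camera_depth_image", "camera_rgb_image", "touch_image", "audio", "gripper_joint_states",
                     "effort", "position", "velocity", "torque", "force"] then
        if PySem.Str.isIn "depth" p.2 then PySem.List.pySetD acc p.1 "Depth-Image"
        else if PySem.Str.isIn "rgb" p.2 then PySem.List.pySetD acc p.1 "RGB-Image"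
        else if PySem.Str.isIn "gripper" p.2 then PySem.List.pySetD acc p.1 "Gripper"
        else PySem.List.pySetD acc p.1 (pyCapitalize p.2)
      else acc)
    names

-- ===== PORT B =====
def pvTable : PySem.Dict String String := PySem.Dict.mk
  [("1-look", "Look"), ("2-stirring-slow", "Stirring-Slow"), ("3-stirring-fast", "Stirring-Fast"),
   ("4-stirring-twist", "Stirring-Twist"), ("5-whisk", "Whisk"), ("6-poke", "Poke"),
   ("plastic-knife", "Plastic-Knife"), ("metal-whisk", "Metal-Whisk"), ("wooden-chopstick", "Wooden-Chopstick"),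
   ("plastic-spoon", "Plastic-Spoon"), ("metal-scissor", "Metal-Scissor"), ("wooden-fork", "Wooden-Fork"),
   ("camera_depth_image", "Depth-Image"), ("camera_rgb_image", "RGB-Image"), ("touch_image", "Touch_image"),
   ("audio", "Audio"), ("gripper_joint_states", "Gripper"), ("effort", "Effort"), ("position", "Position"),
   ("velocity", "Velocity"), ("torque", "Torque"), ("force", "Force")]

def fix_names_alt (names : List String) : List String :=
  names.map (fun name => pvTable.getD name name)

-- ===== PRECONDITION & SPEC =====
def Spec_fix_names (names : List String) (out : List String) : Prop := out = fix_names_alt names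
instance (names : List String) (out : List String) : Decidable (Spec_fix_names names out) := by unfold Spec_fix_names; infer_instance

-- ===== CLAIM (what is proved, stated in full; the proofs are below) =====
def Claim_equal_fix_names : Prop := ∀ (names : List String), Dom_fix_names names → Spec_fix_names names (fix_names names)

-- ===== LEMMAS AND PROOFS =====

-- the body of A's loop, named for the proofs
def pvStepA (acc : List String) (p : Int × String) : List String :=
  if p.2 ∈ ["1-look", "2-stirring-slow", "3-stirring-fast", "4-stirring-twist", "5-whisk", "6-poke"] then
    PySem.List.pySetD acc p.1
      (String.ofList (PySem.Chars.join "-".toList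
        (((PySem.Chars.splitOn (PySem.List.slice p.2.toList (some 2) none) "-".toList)).map pyCapitalizeChars)))
  else if p.2 ∈ ["plastic-knife", "metal-whisk", "wooden-chopstick", "plastic-spoon", "metal-scissor", "wooden-fork"] then
    PySem.List.pySetD acc p.1
      (String.ofList (PySem.Chars.join "-".toList
        (((PySem.Chars.splitOn p.2.toList "-".toList)).map pyCapitalizeChars)))
  else if p.2 ∈ ["camera_depth_image", "camera_rgb_image", "touch_image", "audio", "gripper_joint_states",
                 "effort", "position", "velocity", "torque", "force"] then
    if PySem.Str.isIn "depth" p.2 then PySem.List.pySetD acc p.1 "Depth-Image"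
    else if PySem.Str.isIn "rgb" p.2 then PySem.List.pySetD acc p.1 "RGB-Image"
    else if PySem.Str.isIn "gripper" p.2 then PySem.List.pySetD acc p.1 "Gripper"
    else PySem.List.pySetD acc p.1 (pyCapitalize p.2)
  else acc

-- what A's loop body assigns at each position, as a function of the element
def pvG (name : String) : String :=
  if name ∈ ["1-look", "2-stirring-slow", "3-stirring-fast", "4-stirring-twist", "5-whisk", "6-poke"] then
    String.ofList (PySem.Chars.join "-".toList
      (((PySem.Chars.splitOn (PySem.List.slice name.toList (some 2) none) "-".toList)).map pyCapitalizeChars))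
  else if name ∈ ["plastic-knife", "metal-whisk", "wooden-chopstick", "plastic-spoon", "metal-scissor", "wooden-fork"] then
    String.ofList (PySem.Chars.join "-".toList
      (((PySem.Chars.splitOn name.toList "-".toList)).map pyCapitalizeChars))
  else if name ∈ ["camera_depth_image", "camera_rgb_image", "touch_image", "audio", "gripper_joint_states",
                  "effort", "position", "velocity", "torque", "force"] then
    if PySem.Str.isIn "depth" name then "Depth-Image"
    else if PySem.Str.isIn "rgb" name then "RGB-Image"
    else if PySem.Str.isIn "gripper" name then "Gripper"
    else pyCapitalize name
  else name

lemma pvStepA_eq (done rest : List String) (x : String) :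
    pvStepA (done ++ x :: rest) ((done.length : Int), x) = done ++ pvG x :: rest := by
  have hset : ∀ v : String, (done ++ x :: rest).set done.length v = done ++ v :: rest := by
    intro v
    rw [List.set_append_right _ _ (le_refl _)]
    simp
  unfold pvStepA pvG
  split_ifs <;> simp [PySem.List.pySetD_natCast, hset]

lemma pvLoopA (xs : List String) : ∀ done : List String,
    (PySem.List.enumerate xs (done.length : Int)).foldl pvStepA (done ++ xs) = done ++ xs.map pvG := by
  induction xs with
  | nil => intro done; simp [PySem.List.enumerate_nil]
  | cons x rest ih =>
    intro done
    rw [PySem.List.enumerate_cons, List.foldl_cons, pvStepA_eq done rest x]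
    have h1 : ((done.length : Int) + 1) = (((done ++ [pvG x]).length : Int)) := by
      simp
    have h2 : done ++ pvG x :: rest = (done ++ [pvG x]) ++ rest := by simp
    rw [h1, h2, ih (done ++ [pvG x])]
    simp

-- pointwise agreement of A's cascade with B's table
lemma pvG_eq_table (name : String) : pvG name = pvTable.getD name name := by
  by_cases h1 : name ∈ ["1-look", "2-stirring-slow", "3-stirring-fast", "4-stirring-twist", "5-whisk", "6-poke"]
  · fin_cases h1 <;> decide
  · by_cases h2 : name ∈ ["plastic-knife", "metal-whisk", "wooden-chopstick", "plastic-spoon", "metal-scissor", "wooden-fork"]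
    · fin_cases h2 <;> decide
    · by_cases h3 : name ∈ ["camera_depth_image", "camera_rgb_image", "touch_image", "audio", "gripper_joint_states",
                            "effort", "position", "velocity", "torque", "force"]
      · fin_cases h3 <;> decide
      · simp only [List.mem_cons, not_or] at h1 h2 h3
        obtain ⟨a1, a2, a3, a4, a5, a6⟩ := h1
        obtain ⟨b1, b2, b3, b4, b5, b6⟩ := h2
        obtain ⟨c1, c2, c3, c4, c5, c6, c7, c8, c9, c10⟩ := h3
        unfold pvG pvTable
        rw [PySem.Dict.getD_eq_get?_getD]
        simp [PySem.Dict.get?_mk_cons,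
              a1, a2, a3, a4, a5, a6.1, b1, b2, b3, b4, b5, b6.1,
              c1, c2, c3, c4, c5, c6, c7, c8, c9, c10.1,
              Ne.symm a1, Ne.symm a2, Ne.symm a3, Ne.symm a4, Ne.symm a5, Ne.symm a6.1,
              Ne.symm b1, Ne.symm b2, Ne.symm b3, Ne.symm b4, Ne.symm b5, Ne.symm b6.1,
              Ne.symm c1, Ne.symm c2, Ne.symm c3, Ne.symm c4, Ne.symm c5,
              Ne.symm c6, Ne.symm c7, Ne.symm c8, Ne.symm c9, Ne.symm c10.1]
        rfl

-- ===== VERDICT (by name: the statement is the Claim_ definition above) =====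
theorem fix_names_spec : Claim_equal_fix_names := by
  intro names _
  show fix_names names = fix_names_alt names
  have hA : fix_names names = names.map pvG := pvLoopA names []
  rw [hA, fix_names_alt]
  exact List.map_congr_left (fun x _ => pvG_eq_table x)
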